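-- pv_equiv track=rewrite | github.com/glm02/simu-pic | backend/simulator.py | _split_ternary
-- ===== SOURCE A (Python) =====
-- def _split_ternary(expr: str):
--     """Split `cond ? true_expr : false_expr` respecting nested parens."""
--     depth_p = 0  # parentheses
--     depth_t = 0  # ternary nesting
--     q_pos = -1
--
--     for i, ch in enumerate(expr):
--         if ch == "(":
--             depth_p += 1
--         elif ch == ")":
--             depth_p -= 1
--         elif ch == "?" and depth_p == 0 and depth_t == 0:
--             q_pos = i
--             depth_t += 1
--         elif ch == ":" and depth_p == 0 and depth_t == 1:
--             return (
--                 expr[:q_pos].strip(),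
--                 expr[q_pos + 1: i].strip(),
--                 expr[i + 1:].strip(),
--             )
--     return None
-- ===== SOURCE B (Python) =====
-- def _find_top(s, target):
--     """Index of the first `target` at parenthesis depth 0 in `s`, or -1."""
--     depth = 0
--     for i, ch in enumerate(s):
--         if ch == "(":
--             depth += 1
--         elif ch == ")":
--             depth -= 1
--         elif ch == target and depth == 0:
--             return i
--     return -1
--
--
-- def _split_ternary(expr: str):
--     """Split `cond ? true_expr : false_expr` respecting nested parens."""
--     q = _find_top(expr, "?")
--     if q == -1:
--         return None
--     c_rel = _find_top(expr[q + 1:], ":")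
--     if c_rel == -1:
--         return None
--     c = q + 1 + c_rel
--     return (expr[:q].strip(), expr[q + 1: c].strip(), expr[c + 1:].strip())
-- ===== Notes on version B (the rewrite author's own statement) =====
-- stated objective: alternative
-- what changed: Replaces A's single interleaved loop carrying paren depth, ternary-phase flag and saved question-mark position with a reusable depth-0 character finder called twice: once for the first top-level question mark, once for the first top-level colon in the remainder.
import Mathlib
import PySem

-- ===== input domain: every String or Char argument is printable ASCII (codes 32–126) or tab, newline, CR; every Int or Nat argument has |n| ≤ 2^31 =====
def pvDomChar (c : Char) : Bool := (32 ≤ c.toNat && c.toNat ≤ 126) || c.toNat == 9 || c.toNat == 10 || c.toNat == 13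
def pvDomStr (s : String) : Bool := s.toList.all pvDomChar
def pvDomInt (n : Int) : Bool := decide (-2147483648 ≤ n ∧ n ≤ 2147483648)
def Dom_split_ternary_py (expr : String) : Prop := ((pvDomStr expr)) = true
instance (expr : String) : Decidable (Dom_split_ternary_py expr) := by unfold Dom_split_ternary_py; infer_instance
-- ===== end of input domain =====

-- B replaces A's single interleaved scan (paren depth + ternary flag + saved position) by two phased
-- scans through one shared depth-0 finder; same cost, different decomposition.

-- ===== PORT A =====
-- the enumerate-loop of A, step for step (i = current index, dp = depth_p, dt = depth_t, q = q_pos)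
def pvALoop (expr : String) : List Char → Int → Int → Int → Int → Option (String × String × String)
  | [], _, _, _, _ => none
  | ch :: rest, i, dp, dt, q =>
    if ch = '(' then pvALoop expr rest (i+1) (dp+1) dt q
    else if ch = ')' then pvALoop expr rest (i+1) (dp-1) dt q
    else if ch = '?' ∧ dp = 0 ∧ dt = 0 then pvALoop expr rest (i+1) dp (dt+1) i
    else if ch = ':' ∧ dp = 0 ∧ dt = 1 then
      some (PySem.Str.strip (PySem.Str.slice expr none (some q)),
            PySem.Str.strip (PySem.Str.slice expr (some (q+1)) (some i)),
            PySem.Str.strip (PySem.Str.slice expr (some (i+1)) none))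
    else pvALoop expr rest (i+1) dp dt q

def split_ternary_py (expr : String) : Option (String × String × String) :=
  pvALoop expr expr.toList 0 0 0 (-1)

-- ===== PORT B =====
-- _find_top: first occurrence of `target` at parenthesis depth 0, or -1
def pvFindTop : List Char → Char → Int → Int → Int
  | [], _, _, _ => -1
  | ch :: rest, t, i, depth =>
    if ch = '(' then pvFindTop rest t (i+1) (depth+1)
    else if ch = ')' then pvFindTop rest t (i+1) (depth-1)
    else if ch = t ∧ depth = 0 then i
    else pvFindTop rest t (i+1) depth

def split_ternary_py_alt (expr : String) : Option (String × String × String) :=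
  let q := pvFindTop expr.toList '?' 0 0
  if q = -1 then none
  else
    let c_rel := pvFindTop (PySem.Str.slice expr (some (q+1)) none).toList ':' 0 0
    if c_rel = -1 then none
    else
      let c := q + 1 + c_rel
      some (PySem.Str.strip (PySem.Str.slice expr none (some q)),
            PySem.Str.strip (PySem.Str.slice expr (some (q+1)) (some c)),
            PySem.Str.strip (PySem.Str.slice expr (some (c+1)) none))

-- ===== PRECONDITION & SPEC =====
def Spec_split_ternary_py (expr : String) (out : Option (String × String × String)) : Prop := out = split_ternary_py_alt expr
instance (expr : String) (out : Option (String × String × String)) : Decidable (Spec_split_ternary_py expr out) := by unfold Spec_split_ternary_py; infer_instance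

-- ===== CLAIM (what is proved, stated in full; the proofs are below) =====
def Claim_equal_split_ternary_py : Prop := ∀ (expr : String), Dom_split_ternary_py expr → Spec_split_ternary_py expr (split_ternary_py expr)

-- ===== LEMMAS AND PROOFS =====

def pvMkOut (expr : String) (q c : Int) : Option (String × String × String) :=
  some (PySem.Str.strip (PySem.Str.slice expr none (some q)),
        PySem.Str.strip (PySem.Str.slice expr (some (q+1)) (some c)),
        PySem.Str.strip (PySem.Str.slice expr (some (c+1)) none))

-- pvFindTop returns -1 or an index ≥ the running index
theorem pvFindTop_lb (cs : List Char) (t : Char) : ∀ (i d : Int),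
    pvFindTop cs t i d = -1 ∨ i ≤ pvFindTop cs t i d := by
  induction cs with
  | nil => intro i d; left; rfl
  | cons ch rest ih =>
    intro i d
    simp only [pvFindTop]
    split_ifs with h1 h2 h3
    · rcases ih (i+1) (d+1) with h | h
      · left; exact h
      · right; omega
    · rcases ih (i+1) (d-1) with h | h
      · left; exact h
      · right; omega
    · right; omega
    · rcases ih (i+1) d with h | h
      · left; exact h
      · right; omega

-- shifting the running index shifts the result
theorem pvFindTop_shift (cs : List Char) (t : Char) : ∀ (d k : Int),
    pvFindTop cs t k d =
      (if pvFindTop cs t 0 d = -1 then -1 else k + pvFindTop cs t 0 d) := by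
  induction cs with
  | nil => intro d k; simp [pvFindTop]
  | cons ch rest ih =>
    intro d k
    by_cases h1 : ch = '('
    · have ha : ∀ (j : Int), pvFindTop (ch :: rest) t j d = pvFindTop rest t (j+1) (d+1) := by
        intro j; simp [pvFindTop, h1]
      rw [ha k, ha 0]; simp only [zero_add]; rw [ih (d+1) (k+1), ih (d+1) 1]
      rcases pvFindTop_lb rest t 0 (d+1) with h | h <;> split_ifs <;> omega
    · by_cases h2 : ch = ')'
      · have ha : ∀ (j : Int), pvFindTop (ch :: rest) t j d = pvFindTop rest t (j+1) (d-1) := by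
          intro j; simp [pvFindTop, h2]
        rw [ha k, ha 0]; simp only [zero_add]; rw [ih (d-1) (k+1), ih (d-1) 1]
        rcases pvFindTop_lb rest t 0 (d-1) with h | h <;> split_ifs <;> omega
      · by_cases h3 : ch = t ∧ d = 0
        · obtain ⟨ht, hd⟩ := h3
          have ha : ∀ (j : Int), pvFindTop (ch :: rest) t j d = j := by
            intro j; simp only [pvFindTop]; rw [if_neg h1, if_neg h2, if_pos ⟨ht, hd⟩]
          rw [ha k, ha 0]
          norm_num
        · have ha : ∀ (j : Int), pvFindTop (ch :: rest) t j d = pvFindTop rest t (j+1) d := by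
            intro j; simp only [pvFindTop]; rw [if_neg h1, if_neg h2, if_neg h3]
          rw [ha k, ha 0]; simp only [zero_add]; rw [ih d (k+1), ih d 1]
          rcases pvFindTop_lb rest t 0 d with h | h <;> split_ifs <;> omega

-- phase 1 of A's loop (after the top-level '?') is B's second scan
theorem pvALoop_phase1 (expr : String) (cs : List Char) : ∀ (i dp q : Int), 0 ≤ i →
    pvALoop expr cs i dp 1 q =
      (if pvFindTop cs ':' i dp = -1 then none
       else pvMkOut expr q (pvFindTop cs ':' i dp)) := by
  induction cs with
  | nil => intro i dp q _; simp [pvALoop, pvFindTop]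
  | cons ch rest ih =>
    intro i dp q hi
    by_cases h1 : ch = '('
    · have ha : pvALoop expr (ch :: rest) i dp 1 q = pvALoop expr rest (i+1) (dp+1) 1 q := by
        simp [pvALoop, h1]
      have hf : pvFindTop (ch :: rest) ':' i dp = pvFindTop rest ':' (i+1) (dp+1) := by
        simp [pvFindTop, h1]
      rw [ha, hf]; exact ih (i+1) (dp+1) q (by omega)
    · by_cases h2 : ch = ')'
      · have ha : pvALoop expr (ch :: rest) i dp 1 q = pvALoop expr rest (i+1) (dp-1) 1 q := by
          simp [pvALoop, h2]
        have hf : pvFindTop (ch :: rest) ':' i dp = pvFindTop rest ':' (i+1) (dp-1) := by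
          simp [pvFindTop, h2]
        rw [ha, hf]; exact ih (i+1) (dp-1) q (by omega)
      · by_cases h3 : ch = ':' ∧ dp = 0
        · have ha : pvALoop expr (ch :: rest) i dp 1 q = pvMkOut expr q i := by
            simp [pvALoop, h3.1, h3.2, pvMkOut]
          have hf : pvFindTop (ch :: rest) ':' i dp = i := by
            simp [pvFindTop, h3.1, h3.2]
          rw [ha, hf, if_neg (by omega)]
        · have ha : pvALoop expr (ch :: rest) i dp 1 q = pvALoop expr rest (i+1) dp 1 q := by
            simp only [pvALoop]
            rw [if_neg h1, if_neg h2, if_neg (fun h => absurd h.2.2 (by norm_num)),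
                if_neg (fun h => h3 ⟨h.1, h.2.1⟩)]
          have hf : pvFindTop (ch :: rest) ':' i dp = pvFindTop rest ':' (i+1) dp := by
            simp only [pvFindTop]; rw [if_neg h1, if_neg h2, if_neg h3]
          rw [ha, hf]; exact ih (i+1) dp q (by omega)

-- phase 0 of A's loop over the suffix `full.drop n` equals B's two-scan composition
theorem pvALoop_phase0 (expr : String) : ∀ (cs : List Char) (full : List Char) (n : Nat),
    full.drop n = cs → ∀ (d q : Int),
    pvALoop expr cs (n : Int) d 0 q =
      (if pvFindTop cs '?' (n : Int) d = -1 then none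
       else if pvFindTop (full.drop ((pvFindTop cs '?' (n : Int) d).toNat + 1)) ':' 0 0 = -1 then none
       else pvMkOut expr (pvFindTop cs '?' (n : Int) d)
              (pvFindTop cs '?' (n : Int) d + 1
                + pvFindTop (full.drop ((pvFindTop cs '?' (n : Int) d).toNat + 1)) ':' 0 0)) := by
  intro cs
  induction cs with
  | nil => intro full n _ d q; simp [pvALoop, pvFindTop]
  | cons ch rest ih =>
    intro full n hdrop d q
    have hrest : full.drop (n + 1) = rest := by
      rw [← List.tail_drop, hdrop]; rfl
    have hcast : ((n : Int) + 1) = ((n + 1 : Nat) : Int) := by push_cast; ring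
    by_cases h1 : ch = '('
    · have ha : pvALoop expr (ch :: rest) (n : Int) d 0 q = pvALoop expr rest ((n : Int)+1) (d+1) 0 q := by
        simp [pvALoop, h1]
      have hf : pvFindTop (ch :: rest) '?' (n : Int) d = pvFindTop rest '?' ((n : Int)+1) (d+1) := by
        simp [pvFindTop, h1]
      rw [ha, hf, hcast]; exact ih full (n+1) hrest (d+1) q
    · by_cases h2 : ch = ')'
      · have ha : pvALoop expr (ch :: rest) (n : Int) d 0 q = pvALoop expr rest ((n : Int)+1) (d-1) 0 q := by
          simp [pvALoop, h2]
        have hf : pvFindTop (ch :: rest) '?' (n : Int) d = pvFindTop rest '?' ((n : Int)+1) (d-1) := by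
          simp [pvFindTop, h2]
        rw [ha, hf, hcast]; exact ih full (n+1) hrest (d-1) q
      · by_cases h3 : ch = '?' ∧ d = 0
        · -- top-level '?': A switches to phase 1; B's first scan stops here
          have ha : pvALoop expr (ch :: rest) (n : Int) d 0 q = pvALoop expr rest ((n : Int)+1) 0 1 (n : Int) := by
            simp [pvALoop, h3.1, h3.2]
          have hf : pvFindTop (ch :: rest) '?' (n : Int) d = (n : Int) := by
            simp [pvFindTop, h3.1, h3.2]
          rw [ha, hf, if_neg (by omega)]
          have htn : ((n : Int).toNat + 1) = n + 1 := by omega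
          rw [htn, hrest, pvALoop_phase1 expr rest ((n : Int)+1) 0 (n : Int) (by omega),
              pvFindTop_shift rest ':' 0 ((n : Int)+1)]
          rcases pvFindTop_lb rest ':' 0 0 with h | h
          · rw [if_pos h, if_pos rfl, if_pos h]
          · rw [if_neg (by omega), if_neg (by omega), if_neg (by omega)]
        · have ha : pvALoop expr (ch :: rest) (n : Int) d 0 q = pvALoop expr rest ((n : Int)+1) d 0 q := by
            simp only [pvALoop]
            rw [if_neg h1, if_neg h2, if_neg (fun h => h3 ⟨h.1, h.2.1⟩),
                if_neg (fun h => absurd h.2.2 (by norm_num))]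
          have hf : pvFindTop (ch :: rest) '?' (n : Int) d = pvFindTop rest '?' ((n : Int)+1) d := by
            simp only [pvFindTop]; rw [if_neg h1, if_neg h2, if_neg h3]
          rw [ha, hf, hcast]; exact ih full (n+1) hrest d q

-- ===== VERDICT (by name: the statement is the Claim_ definition above) =====
theorem split_ternary_py_spec : Claim_equal_split_ternary_py := by
  intro expr _
  unfold Spec_split_ternary_py
  simp only [split_ternary_py, split_ternary_py_alt]
  have h00 := pvALoop_phase0 expr expr.toList expr.toList 0 rfl 0 (-1)
  simp only [Nat.cast_zero] at h00
  rw [h00]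
  rcases pvFindTop_lb expr.toList '?' 0 0 with h | h
  · rw [if_pos h, if_pos h]
  · have hq : ¬pvFindTop expr.toList '?' 0 0 = -1 := by omega
    rw [if_neg hq]
    have hslice : (PySem.Str.slice expr (some (pvFindTop expr.toList '?' 0 0 + 1)) none).toList
        = expr.toList.drop ((pvFindTop expr.toList '?' 0 0).toNat + 1) := by
      rw [PySem.Str.toList_slice, PySem.Chars.slice_eq_listSlice,
          PySem.List.slice_from _ (by omega)]
      congr 1
      omega
    rw [hslice, if_neg hq]
    rcases pvFindTop_lb (expr.toList.drop ((pvFindTop expr.toList '?' 0 0).toNat + 1)) ':' 0 0 with hc | hc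
    · rw [if_pos hc, if_pos hc]
    · rw [if_neg (by omega), if_neg (by omega)]
      rfl
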